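-- pv_equiv track=rewrite | github.com/jednipit-golf/Comprog | Grader/09_Nestedloop/09_Fill_In_Numbers.py | pattern6
-- ===== SOURCE A (Python) =====
-- def pattern6(n):
--     x = [[0]*n for i in range(n)]
--     i = 1
--     for d in range(n):
--         if d%2 == 0:
--             for r in range(0,n-d):
--                 c = r + d
--                 x[r][c] = i
--                 i += 1
--         else:
--             for r in range(n-d-1,-1,-1):
--                 c = r + d
--                 x[r][c] = i
--                 i += 1
--     return x
-- ===== SOURCE B (Python) =====
-- def pattern6(n):
--     def val(r, c):
--         d = c - r
--         if d < 0:
--             return 0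
--         base = 1 + d * n - d * (d - 1) // 2
--         return base + (r if d % 2 == 0 else n - d - 1 - r)
--     return [[val(r, c) for c in range(n)] for r in range(n)]
-- ===== Notes on version B (the rewrite author's own statement) =====
-- stated objective: alternative
-- what changed: B computes every cell independently from a closed-form per-diagonal base (1 + d*n - d*(d-1)//2) plus a parity-dependent row offset, instead of A's walk along the diagonals with a shared incrementing counter and in-place assignments.
import Mathlib
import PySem

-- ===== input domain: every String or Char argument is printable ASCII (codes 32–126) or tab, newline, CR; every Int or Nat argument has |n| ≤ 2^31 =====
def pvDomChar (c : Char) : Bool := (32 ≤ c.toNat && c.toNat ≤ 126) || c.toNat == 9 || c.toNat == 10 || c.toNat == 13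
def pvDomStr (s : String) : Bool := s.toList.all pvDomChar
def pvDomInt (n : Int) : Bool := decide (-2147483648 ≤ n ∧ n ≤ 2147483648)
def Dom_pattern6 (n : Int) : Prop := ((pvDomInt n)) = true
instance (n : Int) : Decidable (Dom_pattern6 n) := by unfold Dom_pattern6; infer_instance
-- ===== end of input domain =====

-- B fills each cell independently from a closed-form per-diagonal base (1 + d*n - d*(d-1)//2)
-- instead of walking the diagonals with a shared incrementing counter; objective: alternative decomposition.

-- ===== PORT A =====
-- x[r][c] = v for 0 ≤ r, c (all assignments in A use in-range nonnegative indices, so List.set is exact)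
def pvSet2 (x : List (List Int)) (r c : Nat) (v : Int) : List (List Int) :=
  x.set r ((x.getD r []).set c v)

def pattern6 (n : Int) : List (List Int) :=
  let x0 := (PySem.List.pyRange 0 n 1).map (fun _ => List.replicate n.toNat (0 : Int))
  let res := (PySem.List.pyRange 0 n 1).foldl (fun (st : List (List Int) × Int) d =>
    if PySem.Int.mod d 2 = 0 then
      (PySem.List.pyRange 0 (n - d) 1).foldl (fun st r =>
        let c := r + d
        (pvSet2 st.1 r.toNat c.toNat st.2, st.2 + 1)) st
    else
      (PySem.List.pyRange (n - d - 1) (-1) (-1)).foldl (fun st r =>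
        let c := r + d
        (pvSet2 st.1 r.toNat c.toNat st.2, st.2 + 1)) st) (x0, 1)
  res.1

-- ===== PORT B =====
def pattern6_alt (n : Int) : List (List Int) :=
  (PySem.List.pyRange 0 n 1).map (fun r =>
    (PySem.List.pyRange 0 n 1).map (fun c =>
      let d := c - r
      if d < 0 then 0
      else 1 + d * n - PySem.Int.floordiv (d * (d - 1)) 2 +
        (if PySem.Int.mod d 2 = 0 then r else n - d - 1 - r)))

-- ===== PRECONDITION & SPEC =====
def Spec_pattern6 (n : Int) (out : List (List Int)) : Prop := out = pattern6_alt n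
instance (n : Int) (out : List (List Int)) : Decidable (Spec_pattern6 n out) := by unfold Spec_pattern6; infer_instance

-- ===== CLAIM (what is proved, stated in full; the proofs are below) =====
def Claim_equal_pattern6 : Prop := ∀ (n : Int), Dom_pattern6 n → Spec_pattern6 n (pattern6 n)

-- ===== LEMMAS AND PROOFS =====

-- counter value at the start of diagonal d
def pvBase (n : Int) : Nat → Int
  | 0 => 1
  | d + 1 => pvBase n d + (n - d)

-- the value A ends up writing at cell (r,c) of the upper triangle
def pvVal (n : Int) (r c : Nat) : Int :=
  pvBase n (c - r) +
    (if (c - r) % 2 = 0 then (r : Int) else n - ((c - r : Nat) : Int) - 1 - (r : Int))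

-- matrix after diagonals < d are done and, on diagonal d, rows < k (ascending fill)
def pvMatE (n : Int) (d k : Nat) : List (List Int) :=
  (List.range n.toNat).map (fun i => (List.range n.toNat).map (fun j =>
    if i ≤ j ∧ (j - i < d ∨ (j - i = d ∧ i < k)) then pvVal n i j else 0))

-- matrix after diagonals < d are done and, on diagonal d, rows ≥ k (descending fill)
def pvMatO (n : Int) (d k : Nat) : List (List Int) :=
  (List.range n.toNat).map (fun i => (List.range n.toNat).map (fun j =>
    if i ≤ j ∧ (j - i < d ∨ (j - i = d ∧ k ≤ i)) then pvVal n i j else 0))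

lemma map_range_set {α : Type} (N r : Nat) (f : Nat → α) (v : α) :
    ((List.range N).map f).set r v = (List.range N).map (fun i => if i = r then v else f i) := by
  apply List.ext_getElem (by simp)
  intro i h1 h2
  simp only [List.getElem_set, List.getElem_map, List.getElem_range]
  split_ifs with h h' h'
  · rfl
  · exact absurd h.symm h'
  · exact absurd h'.symm h
  · rfl

lemma map_range_getD {α : Type} (N r : Nat) (f : Nat → α) (dfl : α) (h : r < N) :
    ((List.range N).map f).getD r dfl = f r := by
  rw [List.getD_eq_getElem?_getD]
  simp [h]

lemma set2_map_range (N r c : Nat) (g : Nat → Nat → Int) (v : Int) (hr : r < N) :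
    pvSet2 ((List.range N).map (fun i => (List.range N).map (g i))) r c v
      = (List.range N).map (fun i => (List.range N).map (fun j =>
          if i = r ∧ j = c then v else g i j)) := by
  unfold pvSet2
  rw [map_range_getD _ _ _ _ hr, map_range_set, map_range_set]
  apply List.map_congr_left
  intro i hi
  by_cases h : i = r
  · subst h; rw [if_pos rfl]
    apply List.map_congr_left; intro j hj
    by_cases hc : j = c <;> simp [hc]
  · simp only [if_neg h]
    apply List.map_congr_left; intro j hj
    simp [h]

lemma mat_ext (N : Nat) (f g : Nat → Nat → Int)
    (h : ∀ i < N, ∀ j < N, f i j = g i j) :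
    (List.range N).map (fun i => (List.range N).map (f i))
      = (List.range N).map (fun i => (List.range N).map (g i)) := by
  apply List.map_congr_left; intro i hi
  apply List.map_congr_left; intro j hj
  exact h i (List.mem_range.mp hi) j (List.mem_range.mp hj)

lemma even_loop (n : Int) (_hn : 0 ≤ n) (d : Nat) (hd : d < n.toNat) (he : d % 2 = 0)
    (k : Nat) (hk : k ≤ n.toNat - d) :
    (PySem.List.pyRange 0 (k : Int) 1).foldl (fun st r =>
        let c := r + (d : Int)
        (pvSet2 st.1 r.toNat c.toNat st.2, st.2 + 1)) (pvMatE n d 0, pvBase n d)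
      = (pvMatE n d k, pvBase n d + k) := by
  induction k with
  | zero =>
    rw [show ((0:Nat):Int) = 0 by rfl, PySem.List.pyRange_one_eq_nil le_rfl]
    simp
  | succ k ih =>
    have hk' : k ≤ n.toNat - d := Nat.le_of_succ_le hk
    have hkN : k < n.toNat := by omega
    have hcN : k + d < n.toNat := by omega
    rw [show (((k+1:Nat)):Int) = (k:Int) + 1 by push_cast; ring,
        PySem.List.pyRange_one_succ_right (by positivity), List.foldl_append, ih hk']
    simp only [List.foldl_cons, List.foldl_nil]
    have htn : ((k:Int) + (d:Int)).toNat = k + d := by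
      rw [show (k:Int) + (d:Int) = ((k + d : Nat) : Int) by push_cast; ring, Int.toNat_natCast]
    unfold pvMatE
    rw [Int.toNat_natCast, htn, set2_map_range _ _ _ _ _ hkN]
    refine Prod.ext ?_ (by push_cast; ring)
    apply mat_ext
    intro i hi j hj
    by_cases hij : i = k ∧ j = k + d
    · obtain ⟨hik, hjc⟩ := hij
      rw [if_pos ⟨hik, hjc⟩, if_pos (by omega)]
      unfold pvVal
      have hd2 : j - i = d := by omega
      rw [hd2, if_pos he, hik]
    · rw [if_neg hij]
      have hiff : (i ≤ j ∧ (j - i < d ∨ (j - i = d ∧ i < k))) ↔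
          (i ≤ j ∧ (j - i < d ∨ (j - i = d ∧ i < k + 1))) := by omega
      rw [if_congr hiff rfl rfl]

lemma odd_loop (n : Int) (hn : 0 ≤ n) (d : Nat) (hd : d < n.toNat) (ho : d % 2 = 1)
    (k : Nat) (hk : k ≤ n.toNat - d) :
    (PySem.List.pyRange ((k : Int) - 1) (-1) (-1)).foldl (fun st r =>
        let c := r + (d : Int)
        (pvSet2 st.1 r.toNat c.toNat st.2, st.2 + 1))
        (pvMatO n d k, pvBase n d + ((n.toNat - d : Nat) : Int) - k)
      = (pvMatO n d 0, pvBase n d + ((n.toNat - d : Nat) : Int)) := by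
  induction k with
  | zero =>
    rw [show ((0:Nat):Int) - 1 = -1 by rfl, PySem.List.pyRange_neg_one_eq_nil le_rfl]
    simp
  | succ k ih =>
    have hk' : k ≤ n.toNat - d := Nat.le_of_succ_le hk
    have hkN : k < n.toNat := by omega
    have hcN : k + d < n.toNat := by omega
    have hL : ((n.toNat - d : Nat) : Int) = n - d := by omega
    have htn : ((k:Int) + (d:Int)).toNat = k + d := by
      rw [show (k:Int) + (d:Int) = ((k + d : Nat) : Int) by push_cast; ring, Int.toNat_natCast]
    have hstep : pvSet2 (pvMatO n d (k+1)) ((k:Int)).toNat ((k:Int) + (d:Int)).toNat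
          (pvBase n d + ((n.toNat - d : Nat) : Int) - ((k+1:Nat) : Int))
        = pvMatO n d k := by
      unfold pvMatO
      rw [Int.toNat_natCast, htn, set2_map_range _ _ _ _ _ hkN]
      apply mat_ext
      intro i hi j hj
      by_cases hij : i = k ∧ j = k + d
      · obtain ⟨hik, hjc⟩ := hij
        rw [if_pos ⟨hik, hjc⟩, if_pos (by omega)]
        unfold pvVal
        have hd2 : j - i = d := by omega
        rw [hd2, if_neg (by omega), hL, hik]
        push_cast; ring
      · rw [if_neg hij]
        have hiff : (i ≤ j ∧ (j - i < d ∨ (j - i = d ∧ k + 1 ≤ i))) ↔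
            (i ≤ j ∧ (j - i < d ∨ (j - i = d ∧ k ≤ i))) := by omega
        rw [if_congr hiff rfl rfl]
    rw [show (((k+1:Nat)):Int) - 1 = (k:Int) by push_cast; ring,
        PySem.List.pyRange_neg_one_cons (by omega)]
    simp only [List.foldl_cons]
    rw [hstep, show pvBase n d + ((n.toNat - d : Nat) : Int) - ((k+1:Nat) : Int) + 1
          = pvBase n d + ((n.toNat - d : Nat) : Int) - (k : Int) by push_cast; ring]
    exact ih hk'

lemma matE_zero_top (n : Int) (d : Nat) : pvMatE n (d + 1) 0 = pvMatE n d (n.toNat - d) := by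
  unfold pvMatE
  apply mat_ext
  intro i hi j hj
  exact if_congr (by omega) rfl rfl

lemma matO_full (n : Int) (d : Nat) : pvMatO n d (n.toNat - d) = pvMatE n d 0 := by
  unfold pvMatO pvMatE
  apply mat_ext
  intro i hi j hj
  exact if_congr (by omega) rfl rfl

lemma matO_zero (n : Int) (d : Nat) : pvMatO n d 0 = pvMatE n (d + 1) 0 := by
  unfold pvMatO pvMatE
  apply mat_ext
  intro i hi j hj
  exact if_congr (by omega) rfl rfl

lemma outer_loop (n : Int) (hn : 0 ≤ n) (m : Nat) (hm : m ≤ n.toNat) :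
    (PySem.List.pyRange 0 (m : Int) 1).foldl (fun (st : List (List Int) × Int) d =>
      if PySem.Int.mod d 2 = 0 then
        (PySem.List.pyRange 0 (n - d) 1).foldl (fun st r =>
          let c := r + d
          (pvSet2 st.1 r.toNat c.toNat st.2, st.2 + 1)) st
      else
        (PySem.List.pyRange (n - d - 1) (-1) (-1)).foldl (fun st r =>
          let c := r + d
          (pvSet2 st.1 r.toNat c.toNat st.2, st.2 + 1)) st) (pvMatE n 0 0, 1)
      = (pvMatE n m 0, pvBase n m) := by
  induction m with
  | zero =>
    rw [show ((0:Nat):Int) = 0 from rfl, PySem.List.pyRange_one_eq_nil le_rfl]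
    simp [pvBase]
  | succ m ih =>
    have hm' : m ≤ n.toNat := Nat.le_of_succ_le hm
    have hmN : m < n.toNat := hm
    rw [show (((m+1:Nat)):Int) = (m:Int) + 1 by push_cast; ring,
        PySem.List.pyRange_one_succ_right (by positivity), List.foldl_append, ih hm']
    simp only [List.foldl_cons, List.foldl_nil]
    rw [show (2:Int) = ((2:Nat):Int) from rfl, PySem.Int.mod_natCast]
    by_cases hpar : m % 2 = 0
    · rw [if_pos (by rw [hpar]; rfl)]
      rw [show n - (m:Int) = ((n.toNat - m : Nat) : Int) by omega,
          even_loop n hn m hmN hpar (n.toNat - m) le_rfl, matE_zero_top]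
      refine Prod.ext rfl ?_
      show pvBase n m + ((n.toNat - m : Nat) : Int) = pvBase n (m + 1)
      rw [show ((n.toNat - m : Nat) : Int) = n - (m:Int) by omega]
      rfl
    · have hpar1 : m % 2 = 1 := by omega
      rw [if_neg (by rw [hpar1]; decide)]
      rw [show n - (m:Int) - 1 = ((n.toNat - m : Nat) : Int) - 1 by omega,
          show pvMatE n m 0 = pvMatO n m (n.toNat - m) from (matO_full n m).symm,
          show pvBase n m = pvBase n m + ((n.toNat - m : Nat) : Int) - ((n.toNat - m : Nat) : Int) by ring,
          odd_loop n hn m hmN hpar1 (n.toNat - m) le_rfl, matO_zero]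
      refine Prod.ext rfl ?_
      show pvBase n m + ((n.toNat - m : Nat) : Int) = pvBase n (m + 1)
      rw [show ((n.toNat - m : Nat) : Int) = n - (m:Int) by omega]
      rfl

lemma base_closed (n : Int) (d : Nat) :
    pvBase n d = 1 + (d : Int) * n - PySem.Int.floordiv ((d : Int) * ((d : Int) - 1)) 2 := by
  induction d with
  | zero =>
    rw [PySem.Int.floordiv_eq_ediv_of_pos (by norm_num)]
    simp [pvBase]
  | succ d ih =>
    rw [PySem.Int.floordiv_eq_ediv_of_pos (by norm_num)] at ih ⊢
    simp only [pvBase]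
    push_cast
    rw [ih, show ((d:Int) + 1) * (((d:Int) + 1) - 1) = (d:Int) * ((d:Int) - 1) + (d:Int) * 2 by ring,
        Int.add_mul_ediv_right _ _ (by norm_num : (2:Int) ≠ 0)]
    ring

-- ===== VERDICT (by name: the statement is the Claim_ definition above) =====
theorem pattern6_spec : Claim_equal_pattern6 := by
  intro n _
  unfold Spec_pattern6 pattern6 pattern6_alt
  by_cases hn : 0 ≤ n
  · have hN : ((n.toNat : Nat) : Int) = n := Int.toNat_of_nonneg hn
    have hx0 : (PySem.List.pyRange 0 n 1).map (fun _ => List.replicate n.toNat (0 : Int))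
        = pvMatE n 0 0 := by
      rw [PySem.List.pyRange_one]
      unfold pvMatE
      simp only [List.map_map, sub_zero]
      apply List.map_congr_left
      intro i _
      apply List.ext_getElem (by simp)
      intro j h1 h2
      simp only [Function.comp_apply, List.getElem_replicate, List.getElem_map,
        List.getElem_range]
      rw [if_neg (by omega)]
    have H := outer_loop n hn n.toNat le_rfl
    rw [hN] at H
    simp only [hx0, H]
    rw [PySem.List.pyRange_one]
    unfold pvMatE
    simp only [List.map_map, sub_zero, zero_add]
    apply mat_ext
    intro i hi j hj
    simp only [Function.comp_apply]
    by_cases hij : i ≤ j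
    · rw [if_pos ⟨hij, Or.inl (by omega)⟩]
      have hcast : ((j - i : Nat) : Int) = (j:Int) - (i:Int) := by omega
      rw [if_neg (show ¬ ((j:Int) - (i:Int) < 0) by omega)]
      unfold pvVal
      rw [base_closed, hcast]
      by_cases hpar : (j - i) % 2 = 0
      · rw [if_pos hpar,
            if_pos (show PySem.Int.mod ((j:Int) - (i:Int)) 2 = 0 by
              rw [← hcast, show (2:Int) = ((2:Nat):Int) from rfl,
                 PySem.Int.mod_natCast, hpar]; rfl)]
      · rw [if_neg hpar,
            if_neg (show ¬ PySem.Int.mod ((j:Int) - (i:Int)) 2 = 0 by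
              rw [← hcast, show (2:Int) = ((2:Nat):Int) from rfl,
                 PySem.Int.mod_natCast, show (j - i) % 2 = 1 by omega]; decide)]
    · rw [if_neg (by omega), if_pos (show (j:Int) - (i:Int) < 0 by omega)]
  · simp [PySem.List.pyRange_one_eq_nil (show n ≤ 0 by omega)]
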